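-- pv_equiv track=rewrite | github.com/Mazen149/bitcoin-price-forecasting-portal | btc_portal/ingestion.py | detect_default_price_column
-- ===== SOURCE A (Python) =====
-- from typing import Any, Iterable, Literal, cast
--
-- _PREFERRED_PRICE_ORDER = ("close", "open", "high", "low")
--
-- def detect_default_price_column(candidates: Iterable[str]) -> str | None:
--     candidate_list = list(candidates)
--     if not candidate_list:
--         return None
--
--     lowered_pairs = [(column.lower(), column) for column in candidate_list]
--     for preferred in _PREFERRED_PRICE_ORDER:
--         for lowered, original in lowered_pairs:
--             if preferred == lowered or preferred in lowered:
--                 return original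
--
--     return candidate_list[0]
-- ===== SOURCE B (Python) =====
-- _PREFERRED_PRICE_ORDER = ("close", "open", "high", "low")
--
--
-- def _rank(lowered):
--     for index, preferred in enumerate(_PREFERRED_PRICE_ORDER):
--         if preferred in lowered:
--             return index
--     return len(_PREFERRED_PRICE_ORDER)
--
--
-- def detect_default_price_column(candidates):
--     best_rank = None
--     best = None
--     for column in candidates:
--         rank = _rank(column.lower())
--         if best_rank is None or rank < best_rank:
--             best_rank, best = rank, column
--     return best
-- ===== Notes on version B (the rewrite author's own statement) =====
-- stated objective: alternative
-- what changed: Replaces A's preferred-major nested short-circuit scan with a single candidate-major pass that scores each candidate with a rank (index of the first preferred substring, or 4) and keeps the first argmin; the all-unmatched fallback to the first candidate falls out of the argmin.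
import Mathlib
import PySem

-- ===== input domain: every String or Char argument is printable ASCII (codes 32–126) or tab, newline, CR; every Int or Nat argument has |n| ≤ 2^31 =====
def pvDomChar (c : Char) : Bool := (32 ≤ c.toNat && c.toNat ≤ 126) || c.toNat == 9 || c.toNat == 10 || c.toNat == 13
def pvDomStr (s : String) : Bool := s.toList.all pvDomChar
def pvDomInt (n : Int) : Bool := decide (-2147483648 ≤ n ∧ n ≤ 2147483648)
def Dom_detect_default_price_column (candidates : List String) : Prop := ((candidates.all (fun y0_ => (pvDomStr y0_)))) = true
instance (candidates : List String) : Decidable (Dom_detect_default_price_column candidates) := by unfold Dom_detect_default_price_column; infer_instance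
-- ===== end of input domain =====

-- B replaces A's preferred-major nested short-circuit scan with a single candidate-major
-- argmin pass over per-candidate ranks (objective: alternative, same cost).

-- _PREFERRED_PRICE_ORDER (module constant, used by both programs)
def pvPrefs : List String := ["close", "open", "high", "low"]

-- ===== PORT A =====
-- inner 'for lowered, original in lowered_pairs' loop
def aInner (preferred : String) : List (String × String) → Option String
  | [] => none
  | (lowered, original) :: rest =>
    if (preferred == lowered) || PySem.Str.isIn preferred lowered then some original
    else aInner preferred rest

-- outer 'for preferred in _PREFERRED_PRICE_ORDER' loop
def aOuter (lowered_pairs : List (String × String)) : List String → Option String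
  | [] => none
  | p :: ps =>
    match aInner p lowered_pairs with
    | some o => some o
    | none => aOuter lowered_pairs ps

def detect_default_price_column (candidates : List String) : Option String :=
  if candidates = [] then none
  else
    let lowered_pairs := candidates.map (fun column => (PySem.Str.lower column, column))
    match aOuter lowered_pairs pvPrefs with
    | some original => some original
    | none => PySem.List.pyGet? candidates 0

-- ===== PORT B =====
-- _rank: 'for index, preferred in enumerate(...)' with the running index as accumulator
def rankGo (lowered : String) : List String → Nat → Nat
  | [], index => index
  | preferred :: ps, index =>
    if PySem.Str.isIn preferred lowered then index else rankGo lowered ps (index + 1)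

-- the 'for column in candidates' loop carrying (best_rank, best)
def bLoop (prefs : List String) (best_rank : Option Nat) (best : Option String) :
    List String → Option Nat × Option String
  | [] => (best_rank, best)
  | column :: rest =>
    let r := rankGo (PySem.Str.lower column) prefs 0
    match best_rank with
    | none => bLoop prefs (some r) (some column) rest
    | some bk =>
      if r < bk then bLoop prefs (some r) (some column) rest
      else bLoop prefs best_rank best rest

def detect_default_price_column_alt (candidates : List String) : Option String :=
  (bLoop pvPrefs none none candidates).2

-- ===== PRECONDITION & SPEC =====
def Spec_detect_default_price_column (candidates : List String) (out : Option String) : Prop := out = detect_default_price_column_alt candidates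
instance (candidates : List String) (out : Option String) : Decidable (Spec_detect_default_price_column candidates out) := by unfold Spec_detect_default_price_column; infer_instance

-- ===== CLAIM (what is proved, stated in full; the proofs are below) =====
def Claim_equal_detect_default_price_column : Prop := ∀ (candidates : List String), Dom_detect_default_price_column candidates → Spec_detect_default_price_column candidates (detect_default_price_column candidates)

-- ===== LEMMAS AND PROOFS =====

-- rank of a lowered string relative to a pref list, accumulator-free
def rankAux : List String → String → Nat
  | [], _ => 0
  | p :: ps, l => if PySem.Str.isIn p l then 0 else rankAux ps l + 1

theorem rankGo_eq (l : String) (ps : List String) (i : Nat) :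
    rankGo l ps i = rankAux ps l + i := by
  induction ps generalizing i with
  | nil => simp [rankGo, rankAux]
  | cons p ps ih =>
    simp only [rankGo, rankAux]
    split <;> simp [ih]; omega

-- generic argmin loop parameterised by the key function
def genLoop (f : String → Nat) (bk : Option Nat) (b : Option String) :
    List String → Option Nat × Option String
  | [] => (bk, b)
  | c :: cs =>
    match bk with
    | none => genLoop f (some (f c)) (some c) cs
    | some k => if f c < k then genLoop f (some (f c)) (some c) cs else genLoop f bk b cs

theorem bLoop_eq_genLoop (prefs : List String) (bk : Option Nat) (b : Option String)
    (cs : List String) :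
    bLoop prefs bk b cs = genLoop (fun c => rankAux prefs (PySem.Str.lower c)) bk b cs := by
  induction cs generalizing bk b with
  | nil => rfl
  | cons c cs ih =>
    simp only [bLoop, genLoop, rankGo_eq]
    cases bk <;> simp [ih]

-- A's inner scan is find? on the lowered-substring predicate
theorem pred_eq (p l : String) :
    ((p == l) || PySem.Str.isIn p l) = PySem.Str.isIn p l := by
  by_cases h : p = l
  · subst h
    have ht : PySem.Str.isIn p p = true := (PySem.Str.isIn_iff_infix p p).mpr List.infix_rfl
    rw [ht]; simp
  · simp [h]

theorem aInner_eq_find (p : String) (cands : List String) :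
    aInner p (cands.map (fun c => (PySem.Str.lower c, c)))
      = cands.find? (fun c => PySem.Str.isIn p (PySem.Str.lower c)) := by
  induction cands with
  | nil => rfl
  | cons c cs ih =>
    simp only [List.map_cons, aInner, pred_eq, List.find?]
    split <;> simp_all

-- once the best rank is 0 it is never replaced
theorem genLoop_zero (f : String → Nat) (o : String) (cs : List String) :
    genLoop f (some 0) (some o) cs = (some 0, some o) := by
  induction cs with
  | nil => rfl
  | cons c cs ih => simp [genLoop, ih]

-- a positive-rank state is replaced by the first rank-0 candidate
theorem genLoop_find_zero_pos (f : String → Nat) (cs : List String) (k : Nat) (c o : String)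
    (hk : 0 < k) (h : cs.find? (fun x => f x == 0) = some o) :
    (genLoop f (some k) (some c) cs).2 = some o := by
  induction cs generalizing k c with
  | nil => simp at h
  | cons d ds ih =>
    by_cases hd : f d = 0
    · have : d = o := by simp [List.find?, hd] at h; exact h
      subst this
      simp [genLoop, hd, hk, genLoop_zero]
    · have hb : (f d == 0) = false := by simp [hd]
      have h' : ds.find? (fun x => f x == 0) = some o := by
        simpa [List.find?, hb] using h
      simp only [genLoop]
      split
      · exact ih _ d (by omega) h'
      · exact ih _ c hk h'
  
theorem genLoop_find_zero (f : String → Nat) (cs : List String) (o : String)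
    (h : cs.find? (fun x => f x == 0) = some o) :
    (genLoop f none none cs).2 = some o := by
  cases cs with
  | nil => simp at h
  | cons c cs =>
    by_cases hc : f c = 0
    · have : c = o := by simp [List.find?, hc] at h; exact h
      subst this
      simp [genLoop, hc, genLoop_zero]
    · have hb : (f c == 0) = false := by simp [hc]
      have h' : cs.find? (fun x => f x == 0) = some o := by
        simpa [List.find?, hb] using h
      simpa [genLoop] using genLoop_find_zero_pos f cs (f c) c o (by omega) h'

-- shifting every key by +1 does not change the chosen element
theorem genLoop_shift (f g : String → Nat) (cs : List String)
    (hfg : ∀ c ∈ cs, f c = g c + 1) (bk : Option Nat) (b : Option String) :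
    (genLoop f (bk.map (· + 1)) b cs).2 = (genLoop g bk b cs).2 := by
  induction cs generalizing bk b with
  | nil => rfl
  | cons c cs ih =>
    have hc := hfg c (by simp)
    have hrest : ∀ x ∈ cs, f x = g x + 1 := fun x hx => hfg x (by simp [hx])
    cases bk with
    | none =>
      simpa [genLoop, hc] using ih hrest (some (g c)) (some c)
    | some k =>
      simp only [genLoop, Option.map_some, hc]
      by_cases hlt : g c < k
      · have : g c + 1 < k + 1 := by omega
        simpa [hlt, this] using ih hrest (some (g c)) (some c)
      · have : ¬ g c + 1 < k + 1 := by omega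
        simpa [hlt, this] using ih hrest (some k) b

theorem main_lemma (prefs : List String) (c : String) (cs : List String) :
    (match aOuter ((c :: cs).map (fun x => (PySem.Str.lower x, x))) prefs with
     | some o => some o
     | none => (c :: cs).head?)
    = (genLoop (fun x => rankAux prefs (PySem.Str.lower x)) none none (c :: cs)).2 := by
  induction prefs with
  | nil =>
    simp [aOuter, rankAux, genLoop, genLoop_zero]
  | cons p ps ih =>
    have hpred : (fun x => PySem.Str.isIn p (PySem.Str.lower x))
        = (fun x => rankAux (p :: ps) (PySem.Str.lower x) == 0) := by
      funext x
      simp only [rankAux]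
      split <;> simp_all
    simp only [aOuter, aInner_eq_find]
    cases hfind : (c :: cs).find? (fun x => PySem.Str.isIn p (PySem.Str.lower x)) with
    | some o =>
      have := genLoop_find_zero (fun x => rankAux (p :: ps) (PySem.Str.lower x)) (c :: cs) o
        (by rw [← hpred]; exact hfind)
      simp [this]
    | none =>
      have hnone : ∀ x ∈ c :: cs, PySem.Str.isIn p (PySem.Str.lower x) = false := by
        intro x hx
        simpa using List.find?_eq_none.mp hfind x hx
      have hshift : ∀ x ∈ c :: cs,
          rankAux (p :: ps) (PySem.Str.lower x) = rankAux ps (PySem.Str.lower x) + 1 := by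
        intro x hx
        show (if PySem.Str.isIn p (PySem.Str.lower x) then 0
              else rankAux ps (PySem.Str.lower x) + 1) = rankAux ps (PySem.Str.lower x) + 1
        rw [hnone x hx]
        simp
      have := genLoop_shift (fun x => rankAux (p :: ps) (PySem.Str.lower x))
        (fun x => rankAux ps (PySem.Str.lower x)) (c :: cs) hshift none none
      simp only [Option.map_none] at this
      rw [← this] at ih
      simpa using ih

-- ===== VERDICT (by name: the statement is the Claim_ definition above) =====
theorem detect_default_price_column_spec : Claim_equal_detect_default_price_column := by
  intro candidates _
  unfold Spec_detect_default_price_column detect_default_price_column detect_default_price_column_alt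
  cases candidates with
  | nil => simp [bLoop]
  | cons c cs =>
    rw [bLoop_eq_genLoop]
    have := main_lemma pvPrefs c cs
    simp only [List.head?] at this
    rw [← this]
    simp [PySem.List.pyGet?, PySem.List.pyIdx?]
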